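-- pv_equiv track=rewrite | github.com/ArleneDcosta/Python_leetcode | Integer/numOfSubarrayBoundedMax.py | numOfSubarrayBoundedMax
-- ===== SOURCE A (Python) =====
-- def numOfSubarrayBoundedMax(nums,left,right):
--     ans =  cnt  = 0
--     prev = -1
--     for i,c in enumerate(nums):
--         if left <= nums[i] <= right:
--             cnt = i - prev
--         elif nums[i] > right:
--             prev = i
--             cnt = 0
--         # implicit handling of case when nums[i] < left value will contain the same count as prev but will not include itself
--         ans += cnt
--     return ans
-- ===== SOURCE B (Python) =====
-- def numOfSubarrayBoundedMax(nums, left, right):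
--     if left > right:
--         return 0
--     def countMaxAtMost(bound):
--         total = run = 0
--         for x in nums:
--             run = run + 1 if x <= bound else 0
--             total += run
--         return total
--     return countMaxAtMost(right) - countMaxAtMost(left - 1)
-- ===== Notes on version B (the rewrite author's own statement) =====
-- stated objective: alternative
-- what changed: Replaces the single pass tracking the previous out-of-range index with two run-length passes counting subarrays with max <= right and max <= left-1 and subtracting (0 for an empty range left > right).
import Mathlib
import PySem

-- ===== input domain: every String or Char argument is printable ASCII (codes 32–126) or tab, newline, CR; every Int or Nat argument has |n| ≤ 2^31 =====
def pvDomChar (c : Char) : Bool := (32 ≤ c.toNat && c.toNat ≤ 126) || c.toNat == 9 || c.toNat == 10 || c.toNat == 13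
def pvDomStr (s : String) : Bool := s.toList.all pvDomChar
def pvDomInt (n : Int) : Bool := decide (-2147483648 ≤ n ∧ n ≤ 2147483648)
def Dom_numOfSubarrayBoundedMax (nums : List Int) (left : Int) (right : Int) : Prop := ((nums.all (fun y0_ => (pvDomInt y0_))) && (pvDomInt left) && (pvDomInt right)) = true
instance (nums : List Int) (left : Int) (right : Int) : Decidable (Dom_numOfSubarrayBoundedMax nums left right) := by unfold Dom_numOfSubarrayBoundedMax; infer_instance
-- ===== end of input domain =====

-- B replaces A's single pass tracking the previous out-of-range index with two
-- run-length passes (count of subarrays with max ≤ right minus ≤ left-1); alternative, same cost.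


-- ===== PORT A =====
-- A's loop over enumerate(nums) with state (ans, cnt, prev), branches in source order.
def pvALoop (left right : Int) : List Int → Int → Int → Int → Int → Int
  | [], _, ans, _, _ => ans
  | x :: xs, i, ans, cnt, prev =>
    if left ≤ x ∧ x ≤ right then
      pvALoop left right xs (i + 1) (ans + (i - prev)) (i - prev) prev
    else if x > right then
      pvALoop left right xs (i + 1) (ans + 0) 0 i
    else
      pvALoop left right xs (i + 1) (ans + cnt) cnt prev

def numOfSubarrayBoundedMax (nums : List Int) (left : Int) (right : Int) : Int :=
  pvALoop left right nums 0 0 0 (-1)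

-- ===== PORT B =====
-- countMaxAtMost: running run-length counter, reset when x > bound, accumulated into total.
def pvCountLoop (bound : Int) : List Int → Int → Int → Int
  | [], total, _ => total
  | x :: xs, total, run =>
    let run' := if x ≤ bound then run + 1 else 0
    pvCountLoop bound xs (total + run') run'

def pvCountMaxAtMost (nums : List Int) (bound : Int) : Int :=
  pvCountLoop bound nums 0 0

def numOfSubarrayBoundedMax_alt (nums : List Int) (left : Int) (right : Int) : Int :=
  if left > right then 0
  else pvCountMaxAtMost nums right - pvCountMaxAtMost nums (left - 1)

-- ===== PRECONDITION & SPEC =====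
def Spec_numOfSubarrayBoundedMax (nums : List Int) (left : Int) (right : Int) (out : Int) : Prop := out = numOfSubarrayBoundedMax_alt nums left right
instance (nums : List Int) (left : Int) (right : Int) (out : Int) : Decidable (Spec_numOfSubarrayBoundedMax nums left right out) := by unfold Spec_numOfSubarrayBoundedMax; infer_instance

-- ===== CLAIM (what is proved, stated in full; the proofs are below) =====
def Claim_equal_numOfSubarrayBoundedMax : Prop := ∀ (nums : List Int) (left : Int) (right : Int), Dom_numOfSubarrayBoundedMax nums left right → Spec_numOfSubarrayBoundedMax nums left right (numOfSubarrayBoundedMax nums left right)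

-- ===== LEMMAS AND PROOFS =====

-- When the window [left,right] is empty, A's cnt can never leave 0, so ans is never increased.
theorem pvALoop_empty_window (left right : Int) (h : right < left) :
    ∀ (xs : List Int) (i ans prev : Int), pvALoop left right xs i ans 0 prev = ans := by
  intro xs
  induction xs with
  | nil => intro i ans prev; rfl
  | cons x xs ih =>
    intro i ans prev
    by_cases h1 : left ≤ x ∧ x ≤ right
    · omega
    · by_cases h2 : x > right
      · simp only [pvALoop, if_neg h1, if_pos h2]
        simpa using ih (i + 1) (ans + 0) i
      · simp only [pvALoop, if_neg h1, if_neg h2]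
        simpa using ih (i + 1) (ans + 0) prev

-- Invariant linking A's state (ans, cnt, prev) after i steps with the two B counters:
-- cnt = runR - runL and prev = i - runR - 1, where runR/runL are the current run lengths
-- for bounds right and left-1, and ans = totalR - totalL.
theorem pvALoop_eq_diff (left right : Int) (hlr : left ≤ right) :
    ∀ (xs : List Int) (i ans cnt prev tR rR tL rL : Int),
      cnt = rR - rL → prev = i - rR - 1 → ans = tR - tL →
      pvALoop left right xs i ans cnt prev =
        pvCountLoop right xs tR rR - pvCountLoop (left - 1) xs tL rL := by
  intro xs
  induction xs with
  | nil =>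
    intro i ans cnt prev tR rR tL rL hc hp ha
    simpa [pvALoop, pvCountLoop] using ha
  | cons x xs ih =>
    intro i ans cnt prev tR rR tL rL hc hp ha
    by_cases h1 : left ≤ x ∧ x ≤ right
    · have hR : x ≤ right := h1.2
      have hL : ¬ x ≤ left - 1 := by omega
      simp only [pvALoop, pvCountLoop, if_pos h1, if_pos hR, if_neg hL]
      exact ih (i + 1) (ans + (i - prev)) (i - prev) prev (tR + (rR + 1)) (rR + 1) (tL + 0) 0
        (by omega) (by omega) (by omega)
    · by_cases h2 : x > right
      · have hR : ¬ x ≤ right := by omega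
        have hL : ¬ x ≤ left - 1 := by omega
        simp only [pvALoop, pvCountLoop, if_neg h1, if_pos h2, if_neg hR, if_neg hL]
        exact ih (i + 1) (ans + 0) 0 i (tR + 0) 0 (tL + 0) 0 (by omega) (by omega) (by omega)
      · have hR : x ≤ right := by omega
        have hL : x ≤ left - 1 := by omega
        simp only [pvALoop, pvCountLoop, if_neg h1, if_neg h2, if_pos hR, if_pos hL]
        exact ih (i + 1) (ans + cnt) cnt prev (tR + (rR + 1)) (rR + 1) (tL + (rL + 1)) (rL + 1)
          (by omega) (by omega) (by omega)

-- ===== VERDICT (by name: the statement is the Claim_ definition above) =====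
theorem numOfSubarrayBoundedMax_spec : Claim_equal_numOfSubarrayBoundedMax := by
  intro nums left right _
  unfold Spec_numOfSubarrayBoundedMax numOfSubarrayBoundedMax numOfSubarrayBoundedMax_alt
  by_cases h : left > right
  · simp only [if_pos h]
    exact pvALoop_empty_window left right h nums 0 0 (-1)
  · simp only [if_neg h]
    exact pvALoop_eq_diff left right (by omega) nums 0 0 0 (-1) 0 0 0 0
      (by ring) (by ring) (by ring)
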